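-- pv_equiv track=rewrite | github.com/autolyticus/computer-graphics-lab | 4/bayer.py | bayer
-- ===== SOURCE A (Python) =====
-- import itertools
--
-- def bayer(height, width):
--     if width % 2 != 0:
--         width += 1
--
--     blueGen = itertools.cycle("BG")
--     redGen = itertools.cycle("GR")
--
--     l = []
--
--     swapArray = [blueGen, redGen]
--     index = 0
--
--     for i in range(height):
--         newl = list(itertools.islice(swapArray[index], width))
--         l.append(newl)
--         index = (index + 1) % 2
--
--     return l
-- ===== SOURCE B (Python) =====
-- def bayer(height, width):
--     if width % 2 != 0:
--         width += 1
--     return [[("B", "G", "G", "R")[2 * (i % 2) + j % 2] for j in range(width)]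
--             for i in range(height)]
-- ===== Notes on version B (the rewrite author's own statement) =====
-- stated objective: simpler
-- what changed: Replaces the two stateful cyclic iterators, the swap array and per-row islice with a closed-form per-cell lookup: each cell is computed independently from its coordinates as ('B','G','G','R')[2*(i%2)+j%2].
import Mathlib
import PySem

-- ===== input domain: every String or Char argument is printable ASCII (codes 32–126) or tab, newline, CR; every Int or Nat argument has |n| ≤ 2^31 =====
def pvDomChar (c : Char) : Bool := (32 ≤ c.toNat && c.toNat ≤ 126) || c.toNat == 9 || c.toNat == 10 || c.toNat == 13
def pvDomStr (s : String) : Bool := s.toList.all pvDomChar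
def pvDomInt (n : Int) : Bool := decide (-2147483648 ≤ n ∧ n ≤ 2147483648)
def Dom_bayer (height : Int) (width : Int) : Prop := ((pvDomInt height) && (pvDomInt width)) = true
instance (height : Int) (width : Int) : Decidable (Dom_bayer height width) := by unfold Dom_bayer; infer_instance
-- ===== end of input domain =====

-- B replaces A's two stateful cyclic iterators and per-row islice by a closed-form
-- per-cell lookup ('B','G','G','R')[2*(i%2)+j%2] (objective: simpler).

-- ===== PORT A =====
-- one islice(cycle(ab), n) step: emit n elements of the 2-cycle starting at offset `off`
def pvCycTake (a b : String) (off : Nat) : Nat → List String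
  | 0 => []
  | n + 1 => (if off % 2 == 0 then a else b) :: pvCycTake a b (off + 1) n

-- the for-loop: state = (index into swapArray, blue-gen offset, red-gen offset); rows in order
def pvBayerLoop (w : Nat) (index bOff rOff : Nat) : Nat → List (List String)
  | 0 => []
  | n + 1 =>
    if index == 0 then
      pvCycTake "B" "G" bOff w :: pvBayerLoop w ((index + 1) % 2) ((bOff + w) % 2) rOff n
    else
      pvCycTake "G" "R" rOff w :: pvBayerLoop w ((index + 1) % 2) bOff ((rOff + w) % 2) n

def bayer (height : Int) (width : Int) : List (List String) :=
  let w := if width % 2 ≠ 0 then width + 1 else width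
  pvBayerLoop w.toNat 0 0 0 height.toNat

-- ===== PORT B =====
-- ('B','G','G','R')[k] with k always in {0,1,2,3}; getD "" is an unreachable total-izer.
def bayer_alt (height : Int) (width : Int) : List (List String) :=
  let w := if width % 2 ≠ 0 then width + 1 else width
  (List.range height.toNat).map (fun i =>
    (List.range w.toNat).map (fun j =>
      (PySem.List.pyGet? ["B", "G", "G", "R"] ((2 * (i % 2) + j % 2 : Nat) : Int)).getD ""))

-- ===== PRECONDITION & SPEC =====
-- Pre_ excludes only inputs where A raises: with height > 0 and width < -1 the islice
-- count is negative and Python raises ValueError.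
def Pre_bayer (height : Int) (width : Int) : Prop := 0 < height → -1 ≤ width
instance (height : Int) (width : Int) : Decidable (Pre_bayer height width) := by unfold Pre_bayer; infer_instance
def pvWitness_bayer : Int × Int := (3, 3)

def Spec_bayer (height : Int) (width : Int) (out : List (List String)) : Prop := out = bayer_alt height width
instance (height : Int) (width : Int) (out : List (List String)) : Decidable (Spec_bayer height width out) := by unfold Spec_bayer; infer_instance

-- ===== CLAIM (what is proved, stated in full; the proofs are below) =====
def Claim_equal_bayer : Prop := ∀ (height : Int) (width : Int), Dom_bayer height width → Pre_bayer height width → Spec_bayer height width (bayer height width)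

-- ===== LEMMAS AND PROOFS =====
lemma pvCycTake_eq (a b : String) (off : Nat) (n : Nat) :
    pvCycTake a b off n = (List.range n).map (fun j => if (off + j) % 2 == 0 then a else b) := by
  induction n generalizing off with
  | zero => rfl
  | succ n ih =>
    rw [List.range_succ_eq_map]
    simp only [pvCycTake, List.map_cons, List.map_map, Nat.add_zero, ih]
    congr 1
    apply List.map_congr_left
    intro j _
    simp only [Function.comp_apply]
    have h2 : (off + 1 + j) % 2 = (off + (j + 1)) % 2 := by omega
    simp [h2]

-- B's cell formula equals the parity-case letter
lemma pvCell_eq (i j : Nat) :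
    (PySem.List.pyGet? ["B", "G", "G", "R"] ((2 * (i % 2) + j % 2 : Nat) : Int)).getD "" =
      if i % 2 == 0 then (if j % 2 == 0 then "B" else "G")
      else (if j % 2 == 0 then "G" else "R") := by
  have hi : i % 2 = 0 ∨ i % 2 = 1 := by omega
  have hj : j % 2 = 0 ∨ j % 2 = 1 := by omega
  rcases hi with hi | hi <;> rcases hj with hj | hj <;> simp [hi, hj]

lemma pvBayerLoop_eq (w : Nat) (hw : w % 2 = 0) (n i : Nat) :
    pvBayerLoop w (i % 2) 0 0 n =
      (List.range n).map (fun k =>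
        if (i + k) % 2 == 0 then
          (List.range w).map (fun j => if j % 2 == 0 then "B" else "G")
        else
          (List.range w).map (fun j => if j % 2 == 0 then "G" else "R")) := by
  induction n generalizing i with
  | zero => rfl
  | succ n ih =>
    rw [List.range_succ_eq_map]
    have hs : (0 + w) % 2 = 0 := by omega
    by_cases h : i % 2 = 0
    · have hidx : (0 + 1) % 2 = (i + 1) % 2 := by omega
      simp only [pvBayerLoop, h, hs, hidx, ih (i + 1), List.map_cons, List.map_map]
      rw [if_pos (by decide : (((0:Nat) == 0) = true))]
      congr 1
      · simp [pvCycTake_eq, h]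
      · apply List.map_congr_left
        intro k _
        simp only [Function.comp]
        have h2 : (i + 1 + k) % 2 = (i + (k + 1)) % 2 := by omega
        simp [h2]
    · have h1 : i % 2 = 1 := by omega
      have hidx : (1 + 1) % 2 = (i + 1) % 2 := by omega
      simp only [pvBayerLoop, h1, hs, hidx, ih (i + 1), List.map_cons, List.map_map]
      rw [if_neg (by decide : ¬(((1:Nat) == 0) = true))]
      congr 1
      · simp [pvCycTake_eq, h1]
      · apply List.map_congr_left
        intro k _
        simp only [Function.comp]
        have h2 : (i + 1 + k) % 2 = (i + (k + 1)) % 2 := by omega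
        simp [h2]

-- ===== VERDICT (by name: the statement is the Claim_ definition above) =====
theorem bayer_spec : Claim_equal_bayer := by
  intro height width _ hpre
  unfold Spec_bayer bayer bayer_alt
  by_cases hh : 0 < height
  · have hwge : -1 ≤ width := hpre hh
    set w : Int := if width % 2 ≠ 0 then width + 1 else width with hwdef
    have hmod : width % 2 = 0 ∨ width % 2 = 1 := by omega
    have hweven : w % 2 = 0 ∧ 0 ≤ w := by
      rcases hmod with h | h <;> simp [hwdef, h] <;> omega
    have hnat : w.toNat % 2 = 0 := by omega
    have hloop := pvBayerLoop_eq w.toNat hnat height.toNat 0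
    simp only [Nat.zero_add] at hloop
    show pvBayerLoop w.toNat 0 0 0 height.toNat = _
    rw [hloop]
    apply List.map_congr_left
    intro k _
    simp only [pvCell_eq]
    by_cases hk : k % 2 = 0 <;> simp [hk]
  · have h0 : height.toNat = 0 := by omega
    show pvBayerLoop _ 0 0 0 height.toNat = _
    simp [h0, pvBayerLoop]
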